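-- pv_equiv track=rewrite | github.com/tecale/sar-project | SAR_lib.py | check_sequential_in_document
-- ===== SOURCE A (Python) =====
-- def check_sequential_in_document(term_positions):
--     """
--     Dada una lista de n listas correspondientes con las posiciones de n términos en una noticia, devuelve true
--     si los términos aparecen en la noticia consecutivamente, en el orden en el que se han pasado las listas
--
--     param:  "term_positions": lista de n listas con las posiciones de los n términos en la noticia
--
--     return: true si los términos aparecen consecutivamente en el orden de las listas
--     """
--     n_terms = len(term_positions)
--     positions = [0]*n_terms
--     while positions[0] < len(term_positions[0]):
--         start_pos = term_positions[0][positions[0]]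
--         for i in range(1,n_terms):
--             #Para cada término, mientras su posición no sea posterior a la del término posterior, lo avanzamos
--             while positions[i] < len(term_positions[i]) and term_positions[i][positions[i]] < start_pos+i:
--                 positions[i] += 1
--             if positions[i] >= len(term_positions[i]):
--                 #Si alguna lista se sale, no puede estar la secuencia
--                 return False
--
--         # Si las posiciones de cada término son secuenciales, devolvemos true
--         if all([term_positions[i][positions[i]] == start_pos + i for i in range(n_terms)]):
--             return True
--         # Si no, incrementamos la posición del primer término, y lo seguimos intentando, hasta llegar al final o encontrarlo
--         positions[0] += 1
--     return False
-- ===== SOURCE B (Python) =====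
-- def check_sequential_in_document(term_positions):
--     first = term_positions[0]
--     # column-major: for each later term, tabulate the value its forward pointer
--     # sees at every outer step (None once the list is exhausted)
--     cols = []
--     for i, lst in enumerate(term_positions[1:], 1):
--         p = 0
--         col = []
--         for s in first:
--             while p < len(lst) and lst[p] < s + i:
--                 p += 1
--             col.append(lst[p] if p < len(lst) else None)
--         cols.append(col)
--     # row scan: find the first step whose row is exactly s+1, s+2, ...
--     for j in range(len(first)):
--         s = first[j]
--         row = [col[j] for col in cols]
--         if None in row:
--             return False
--         if all(v == s + 1 + i for i, v in enumerate(row)):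
--             return True
--     return False
-- ===== Notes on version B (the rewrite author's own statement) =====
-- stated objective: alternative
-- what changed: Interchanges the loops: instead of A's start-major interleaving that maintains one mutable pointer per term inside nested while loops, B tabulates each term's pointer trajectory independently (one column of seen-values per term), then a single row scan over the start positions decides the result; nothing is mutated across terms during the scan.
import Mathlib
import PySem

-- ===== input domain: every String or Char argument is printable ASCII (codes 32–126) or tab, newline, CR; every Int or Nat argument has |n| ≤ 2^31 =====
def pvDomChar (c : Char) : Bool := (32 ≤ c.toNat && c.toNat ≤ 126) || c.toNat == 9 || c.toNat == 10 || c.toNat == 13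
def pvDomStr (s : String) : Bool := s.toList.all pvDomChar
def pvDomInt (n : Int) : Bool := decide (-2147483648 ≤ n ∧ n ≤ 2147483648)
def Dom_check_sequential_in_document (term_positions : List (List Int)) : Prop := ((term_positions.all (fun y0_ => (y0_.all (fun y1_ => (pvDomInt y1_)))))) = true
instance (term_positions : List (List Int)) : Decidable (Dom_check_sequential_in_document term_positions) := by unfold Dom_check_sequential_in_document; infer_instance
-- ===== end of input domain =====

-- B interchanges A's loops: it tabulates each later term's pointer trajectory as a
-- column of seen-values, then decides by a single row scan (alternative, same cost).


-- ===== PORT A =====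
-- inner `while positions[i] < len(...) and term_positions[i][positions[i]] < start_pos+i: positions[i] += 1`
def advA (l : List Int) (t : Int) (p : Nat) : Nat :=
  if h : p < l.length then
    if l[p] < t then advA l t (p + 1) else p
  else p
termination_by l.length - p

-- the `for i in range(1, n_terms)` body: advances each later pointer, `none` = the early `return False`
def innerA (ts : List (List Int)) (rest : List Nat) (start : Int) (i : Nat) : Option (List Nat) :=
  match ts, rest with
  | l :: ts', p :: rest' =>
    let p' := advA l (start + i) p
    if l.length ≤ p' then none
    else
      match innerA ts' rest' start (i + 1) with
      | none => none
      | some r => some (p' :: r)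
  | _, _ => some []

-- the `all([term_positions[i][positions[i]] == start_pos + i ...])` test for the terms i ≥ 1
-- (getD's default is never used: every pointer was just guarded `< len` in innerA)
def checkA (ts : List (List Int)) (rest : List Nat) (start : Int) (i : Nat) : Bool :=
  match ts, rest with
  | l :: ts', p :: rest' => (l.getD p 0 == start + i) && checkA ts' rest' start (i + 1)
  | _, _ => true

-- the outer `while positions[0] < len(term_positions[0])` loop; positions[0] is p0, positions[1:] is rest
def outerA (t0 : List Int) (ts : List (List Int)) (p0 : Nat) (rest : List Nat) : Bool :=
  if h : p0 < t0.length then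
    let start := t0.getD p0 0
    match innerA ts rest start 1 with
    | none => false
    | some rest' =>
      if (t0.getD p0 0 == start) && checkA ts rest' start 1 then true
      else outerA t0 ts (p0 + 1) rest'
  else false
termination_by t0.length - p0

def check_sequential_in_document (term_positions : List (List Int)) : Bool :=
  match term_positions with
  | [] => false   -- Python raises IndexError here (positions[0]); excluded by Pre_
  | t0 :: ts => outerA t0 ts 0 (ts.map fun _ => 0)

-- ===== PORT B =====
-- Source B's `while p < len(lst) and lst[p] < s + i: p += 1`
def advB (lst : List Int) (t : Int) (p : Nat) : Nat :=
  if h : p < lst.length then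
    if lst[p] < t then advB lst t (p + 1) else p
  else p
termination_by lst.length - p

-- one column: `for s in first: … col.append(lst[p] if p < len(lst) else None)`
def colB (lst : List Int) (i : Nat) (first : List Int) (p : Nat) : List (Option Int) :=
  match first with
  | [] => []
  | s :: ss =>
    let p' := advB lst (s + i) p
    (if h : p' < lst.length then some lst[p'] else none) :: colB lst i ss p'

-- `for i, lst in enumerate(term_positions[1:], 1): … cols.append(col)`
def colsB (tss : List (List Int)) (i : Nat) (first : List Int) : List (List (Option Int)) :=
  match tss with
  | [] => []
  | lst :: rest => colB lst i first 0 :: colsB rest (i + 1) first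

-- `all(v == s + 1 + i for i, v in enumerate(row))`, expected value carried along
def rowAllB (row : List (Option Int)) (t : Int) : Bool :=
  match row with
  | [] => true
  | v :: r => (v == some t) && rowAllB r (t + 1)

-- `for j in range(len(first)): …` — the row scan
def scanB (cols : List (List (Option Int))) (first : List Int) (j : Nat) : Bool :=
  match first with
  | [] => false
  | s :: ss =>
    let row := cols.map fun col => col.getD j none
    if row.contains none then false
    else if rowAllB row (s + 1) then true
    else scanB cols ss (j + 1)

def check_sequential_in_document_alt (term_positions : List (List Int)) : Bool :=
  match term_positions with
  | [] => false   -- Python raises IndexError here (term_positions[0]); excluded by Pre_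
  | t0 :: ts => scanB (colsB ts 1 t0) t0 0

-- ===== PRECONDITION & SPEC =====
-- Pre_ excludes only the empty outer list, on which A raises IndexError (positions[0]).
def Pre_check_sequential_in_document (term_positions : List (List Int)) : Prop :=
  term_positions ≠ []
instance (term_positions : List (List Int)) : Decidable (Pre_check_sequential_in_document term_positions) := by unfold Pre_check_sequential_in_document; infer_instance

def pvWitness_check_sequential_in_document : List (List Int) := [[0, 2], [1, 3]]

def Spec_check_sequential_in_document (term_positions : List (List Int)) (out : Bool) : Prop := out = check_sequential_in_document_alt term_positions
instance (term_positions : List (List Int)) (out : Bool) : Decidable (Spec_check_sequential_in_document term_positions out) := by unfold Spec_check_sequential_in_document; infer_instance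

-- ===== CLAIM (what is proved, stated in full; the proofs are below) =====
def Claim_equal_check_sequential_in_document : Prop := ∀ (term_positions : List (List Int)), Dom_check_sequential_in_document term_positions → Pre_check_sequential_in_document term_positions → Spec_check_sequential_in_document term_positions (check_sequential_in_document term_positions)

-- ===== LEMMAS AND PROOFS =====

theorem advB_eq (l : List Int) (t : Int) (p : Nat) : advB l t p = advA l t p := by
  fun_induction advB l t p with
  | case1 p h hlt ih => rw [advA]; simp [h, hlt, ih]
  | case2 p h hlt => rw [advA]; simp [h, hlt]
  | case3 p h => rw [advA]; simp [h]

-- the pointers after the `for i` loop of one outer step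
def advanceAll (ts : List (List Int)) (rest : List Nat) (s : Int) (i : Nat) : List Nat :=
  match ts, rest with
  | l :: ts', p :: rest' => advA l (s + i) p :: advanceAll ts' rest' s (i + 1)
  | _, _ => []

-- the values those pointers see (none = exhausted)
def headRow (ts : List (List Int)) (rest : List Nat) (s : Int) (i : Nat) : List (Option Int) :=
  match ts, rest with
  | l :: ts', p :: rest' =>
    (if h : advA l (s + i) p < l.length then some l[advA l (s + i) p] else none)
      :: headRow ts' rest' s (i + 1)
  | _, _ => []

theorem innerA_eq (ts : List (List Int)) (rest : List Nat) (s : Int) (i : Nat) :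
    innerA ts rest s i =
      if (headRow ts rest s i).contains none then none
      else some (advanceAll ts rest s i) := by
  induction ts generalizing rest i with
  | nil => cases rest <;> simp [innerA, headRow, advanceAll]
  | cons l ts' ih =>
    cases rest with
    | nil => simp [innerA, headRow, advanceAll]
    | cons p rest' =>
      simp only [innerA, headRow, advanceAll, List.contains_cons]
      by_cases h : advA l (s + i) p < l.length
      · have h' : ¬ l.length ≤ advA l (s + i) p := by omega
        rw [ih rest' (i + 1)]
        by_cases hc : none ∈ headRow ts' rest' s (i + 1)
        · simp [h, h', hc]
        · simp [h, h', hc]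
      · have h' : l.length ≤ advA l (s + i) p := by omega
        simp [h, h']

theorem checkA_eq (ts : List (List Int)) (rest : List Nat) (s : Int) (i : Nat)
    (hno : (headRow ts rest s i).contains none = false) :
    checkA ts (advanceAll ts rest s i) s i = rowAllB (headRow ts rest s i) (s + i) := by
  induction ts generalizing rest i with
  | nil => cases rest <;> simp [checkA, advanceAll, headRow, rowAllB]
  | cons l ts' ih =>
    cases rest with
    | nil => simp [checkA, advanceAll, headRow, rowAllB]
    | cons p rest' =>
      simp only [headRow, List.contains_cons, Bool.or_eq_false_iff] at hno
      obtain ⟨h1, h2⟩ := hno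
      have h : advA l (s + i) p < l.length := by
        by_contra hcon
        simp [hcon] at h1
      simp only [checkA, advanceAll, headRow, rowAllB, dif_pos h]
      rw [ih rest' (i + 1) h2]
      have hg : l.getD (advA l (s + i) p) 0 = l[advA l (s + i) p] :=
        List.getD_eq_getElem l 0 h
      rw [hg]
      simp [add_assoc]

-- the columns of Source B generalized to arbitrary current pointers
def colsAt (ts : List (List Int)) (rest : List Nat) (first : List Int) (i : Nat) :
    List (List (Option Int)) :=
  match ts, rest with
  | l :: ts', p :: rest' => colB l i first p :: colsAt ts' rest' first (i + 1)
  | _, _ => []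

theorem colsB_eq_colsAt (ts : List (List Int)) (i : Nat) (first : List Int) :
    colsB ts i first = colsAt ts (ts.map fun _ => 0) first i := by
  induction ts generalizing i with
  | nil => simp [colsB, colsAt]
  | cons l ts' ih => simp [colsB, colsAt, ih]

-- row 0 of the columns is exactly the head row of one A-step
theorem colsAt_row0 (ts : List (List Int)) (rest : List Nat) (s : Int) (ss : List Int) (i : Nat) :
    (colsAt ts rest (s :: ss) i).map (fun col => col.getD 0 none) = headRow ts rest s i := by
  induction ts generalizing rest i with
  | nil => cases rest <;> simp [colsAt, headRow]
  | cons l ts' ih =>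
    cases rest with
    | nil => simp [colsAt, headRow]
    | cons p rest' =>
      simp only [colsAt, colB, List.map_cons, headRow, advB_eq]
      rw [ih rest' (i + 1)]
      simp

-- dropping row 0 advances every pointer by one A-step
theorem colsAt_tail (ts : List (List Int)) (rest : List Nat) (s : Int) (ss : List Int) (i : Nat) :
    (colsAt ts rest (s :: ss) i).map List.tail = colsAt ts (advanceAll ts rest s i) ss i := by
  induction ts generalizing rest i with
  | nil => cases rest <;> simp [colsAt, advanceAll]
  | cons l ts' ih =>
    cases rest with
    | nil => simp [colsAt, advanceAll]
    | cons p rest' =>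
      simp only [colsAt, colB, List.map_cons, advanceAll, advB_eq, List.tail_cons]
      rw [ih rest' (i + 1)]

-- the A-side outer loop, restated on the suffix of the first list
def loopA (ts : List (List Int)) (suf : List Int) (rest : List Nat) : Bool :=
  match suf with
  | [] => false
  | s :: ss =>
    match innerA ts rest s 1 with
    | none => false
    | some rest' =>
      if (s == s) && checkA ts rest' s 1 then true
      else loopA ts ss rest'

theorem drop_eq_getD_cons (l : List Int) (p : Nat) (h : p < l.length) :
    l.drop p = l.getD p 0 :: l.drop (p + 1) := by
  rw [List.getD_eq_getElem l 0 h]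
  exact List.drop_eq_getElem_cons h

theorem outerA_eq_loopA (t0 : List Int) (ts : List (List Int)) (p0 : Nat) (rest : List Nat) :
    outerA t0 ts p0 rest = loopA ts (t0.drop p0) rest := by
  fun_induction outerA t0 ts p0 rest with
  | case1 p0 rest h start hinner =>
    rw [drop_eq_getD_cons t0 p0 h]
    have hinner' : innerA ts rest (t0.getD p0 0) 1 = none := hinner
    simp only [loopA, hinner']
  | case2 p0 rest h start rest' hinner hchk =>
    rw [drop_eq_getD_cons t0 p0 h]
    have hinner' : innerA ts rest (t0.getD p0 0) 1 = some rest' := hinner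
    have hchk' : ((t0.getD p0 0 == t0.getD p0 0) && checkA ts rest' (t0.getD p0 0) 1) = true := hchk
    simp only [loopA, hinner']
    rw [if_pos hchk']
  | case3 p0 rest h start rest' hinner hchk ih =>
    rw [drop_eq_getD_cons t0 p0 h]
    have hinner' : innerA ts rest (t0.getD p0 0) 1 = some rest' := hinner
    have hchk' : ¬ ((t0.getD p0 0 == t0.getD p0 0) && checkA ts rest' (t0.getD p0 0) 1) = true := hchk
    simp only [loopA, hinner']
    rw [if_neg hchk']
    exact ih
  | case4 p0 rest h =>
    have : t0.drop p0 = [] := List.drop_eq_nil_of_le (by omega)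
    simp [this, loopA]

-- the B-side scan, restated on trimmed columns (row index 0)
def scanT (tcols : List (List (Option Int))) (suf : List Int) : Bool :=
  match suf with
  | [] => false
  | s :: ss =>
    let row := tcols.map fun col => col.getD 0 none
    if row.contains none then false
    else if rowAllB row (s + 1) then true
    else scanT (tcols.map List.tail) ss

theorem scanB_eq_scanT (cols : List (List (Option Int))) (suf : List Int) (j : Nat) :
    scanB cols suf j = scanT (cols.map (List.drop j)) suf := by
  induction suf generalizing cols j with
  | nil => simp [scanB, scanT]
  | cons s ss ih =>
    simp only [scanB, scanT]
    have hrow : (cols.map fun col => col.getD j none)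
        = (cols.map (List.drop j)).map fun col => col.getD 0 none := by
      rw [List.map_map]
      apply List.map_congr_left
      intro col _
      simp only [Function.comp_apply]
      rw [List.getD_eq_getElem?_getD, List.getD_eq_getElem?_getD,
        List.getElem?_drop, Nat.add_zero]
    rw [hrow]
    have htail : cols.map (List.drop (j + 1)) = (cols.map (List.drop j)).map List.tail := by
      rw [List.map_map]
      apply List.map_congr_left
      intro col _
      simp [Function.comp_apply, List.tail_drop]
    rw [ih, htail]

theorem loopA_eq_scanT (ts : List (List Int)) (suf : List Int) (rest : List Nat) :
    loopA ts suf rest = scanT (colsAt ts rest suf 1) suf := by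
  induction suf generalizing rest with
  | nil => simp [loopA, scanT]
  | cons s ss ih =>
    simp only [loopA, scanT]
    rw [innerA_eq, colsAt_row0]
    by_cases hc : (headRow ts rest s 1).contains none = true
    · rw [if_pos hc, if_pos hc]
    · rw [if_neg hc, if_neg hc]
      have hcf : (headRow ts rest s 1).contains none = false := by simpa using hc
      have hchk := checkA_eq ts rest s 1 hcf
      have hcast : s + ((1 : Nat) : Int) = s + 1 := by push_cast; ring
      rw [hcast] at hchk
      rw [colsAt_tail, ← ih]
      have hcond : ((s == s) && checkA ts (advanceAll ts rest s 1) s 1)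
          = rowAllB (headRow ts rest s 1) (s + 1) := by simp [hchk]
      have hred : (match some (advanceAll ts rest s 1) with
          | none => false
          | some rest' => if (s == s && checkA ts rest' s 1) = true then true
              else loopA ts ss rest')
          = (if (s == s && checkA ts (advanceAll ts rest s 1) s 1) = true then true
              else loopA ts ss (advanceAll ts rest s 1)) := rfl
      rw [hred, hcond]

-- ===== VERDICT (by name: the statement is the Claim_ definition above) =====
theorem check_sequential_in_document_spec : Claim_equal_check_sequential_in_document := by
  intro tp _hdom hpre
  unfold Spec_check_sequential_in_document
  cases tp with
  | nil => exact absurd rfl hpre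
  | cons t0 ts =>
    simp only [check_sequential_in_document, check_sequential_in_document_alt]
    rw [outerA_eq_loopA, List.drop_zero, loopA_eq_scanT,
      scanB_eq_scanT, colsB_eq_colsAt]
    congr 1
    rw [List.map_congr_left (fun col _ => List.drop_zero (l := col)), List.map_id']
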